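-- pv_equiv track=rewrite | github.com/mindspore-ai/mindarmour | mindarmour/reliability/model_fault_injection/fault_injection.py | _calculate_batch_size
-- ===== SOURCE A (Python) =====
-- def _calculate_batch_size(num, iter_times):
--     """Calculate batch size based on iter_times."""
--     if num <= iter_times:
--         batch_list = [1] * num
--         idx_list = [0] * (num + 1)
--     else:
--         base_batch_size = num // iter_times
--         gt_num = num - iter_times * base_batch_size
--         le_num = iter_times - gt_num
--         batch_list = [base_batch_size + 1] * gt_num + [base_batch_size] * le_num
--         idx_list = [0] * (iter_times + 1)
--     for i, _ in enumerate(batch_list):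
--         idx_list[i + 1] = idx_list[i] + batch_list[i]
--     return idx_list
-- ===== SOURCE B (Python) =====
-- def _calculate_batch_size(num, iter_times):
--     """Calculate batch size based on iter_times."""
--     if num <= iter_times:
--         return list(range(num + 1))
--     base_batch_size = num // iter_times
--     gt_num = num - iter_times * base_batch_size
--     return [i * base_batch_size + min(i, gt_num) for i in range(iter_times + 1)]
-- ===== Notes on version B (the rewrite author's own statement) =====
-- stated objective: simpler
-- what changed: Replaces the auxiliary batch_list and the in-place prefix-sum accumulator loop with a direct closed-form construction of the boundaries: list(range(num+1)) in the num<=iter_times branch and [i*base_batch_size + min(i, gt_num) for i in range(iter_times+1)] otherwise.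
import Mathlib
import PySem

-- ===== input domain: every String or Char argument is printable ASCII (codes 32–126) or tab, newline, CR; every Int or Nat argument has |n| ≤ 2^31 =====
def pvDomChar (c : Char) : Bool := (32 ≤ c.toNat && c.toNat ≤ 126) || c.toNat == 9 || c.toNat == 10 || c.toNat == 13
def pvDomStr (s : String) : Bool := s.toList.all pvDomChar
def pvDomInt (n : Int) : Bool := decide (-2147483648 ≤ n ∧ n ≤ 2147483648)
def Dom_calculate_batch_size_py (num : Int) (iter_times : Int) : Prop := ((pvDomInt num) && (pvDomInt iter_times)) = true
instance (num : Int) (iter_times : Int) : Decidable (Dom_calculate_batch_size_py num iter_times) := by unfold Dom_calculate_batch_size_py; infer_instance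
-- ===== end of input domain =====

-- B replaces A's batch_list + prefix-sum accumulator loop with a closed-form comprehension of the boundaries (objective: simpler).

-- ===== PORT A =====
-- the 'for i, _ in enumerate(batch_list): idx_list[i+1] = idx_list[i] + batch_list[i]' loop
def pvLoopA (batch_list : List Int) (idx_list : List Int) : List Int :=
  (List.range batch_list.length).foldl
    (fun idx i => idx.set (i + 1) (idx.getD i 0 + batch_list.getD i 0)) idx_list

def calculate_batch_size_py (num : Int) (iter_times : Int) : List Int :=
  if num ≤ iter_times then
    pvLoopA (List.replicate num.toNat 1) (List.replicate (num + 1).toNat 0)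
  else
    let base_batch_size := PySem.Int.floordiv num iter_times
    let gt_num := num - iter_times * base_batch_size
    let le_num := iter_times - gt_num
    pvLoopA (List.replicate gt_num.toNat (base_batch_size + 1) ++ List.replicate le_num.toNat base_batch_size)
            (List.replicate (iter_times + 1).toNat 0)

-- ===== PORT B =====
def calculate_batch_size_py_alt (num : Int) (iter_times : Int) : List Int :=
  if num ≤ iter_times then
    PySem.List.pyRange 0 (num + 1) 1
  else
    let base_batch_size := PySem.Int.floordiv num iter_times
    let gt_num := num - iter_times * base_batch_size
    (PySem.List.pyRange 0 (iter_times + 1) 1).map (fun i => i * base_batch_size + min i gt_num)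

-- ===== PRECONDITION & SPEC =====
-- Pre_ excludes exactly the inputs (iter_times = 0 < num) on which A (and B) raise ZeroDivisionError.
def Pre_calculate_batch_size_py (num : Int) (iter_times : Int) : Prop :=
  ¬ (iter_times = 0 ∧ iter_times < num)
instance (num : Int) (iter_times : Int) : Decidable (Pre_calculate_batch_size_py num iter_times) := by
  unfold Pre_calculate_batch_size_py; infer_instance

def pvWitness_calculate_batch_size_py : Int × Int := (7, 3)

def Spec_calculate_batch_size_py (num : Int) (iter_times : Int) (out : List Int) : Prop := out = calculate_batch_size_py_alt num iter_times
instance (num : Int) (iter_times : Int) (out : List Int) : Decidable (Spec_calculate_batch_size_py num iter_times out) := by unfold Spec_calculate_batch_size_py; infer_instance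

-- ===== CLAIM (what is proved, stated in full; the proofs are below) =====
def Claim_equal_calculate_batch_size_py : Prop := ∀ (num : Int) (iter_times : Int), Dom_calculate_batch_size_py num iter_times → Pre_calculate_batch_size_py num iter_times → Spec_calculate_batch_size_py num iter_times (calculate_batch_size_py num iter_times)

-- ===== LEMMAS AND PROOFS =====

-- invariant of A's accumulator loop: after k steps the idx list holds the first k+1 prefix sums, zeros beyond
lemma pvLoop_inv (b : List Int) (k : Nat) (hk : k ≤ b.length) :
    (List.range k).foldl (fun idx i => idx.set (i + 1) (idx.getD i 0 + b.getD i 0))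
      (List.replicate (b.length + 1) (0:Int))
    = (List.range (k + 1)).map (fun j => (b.take j).sum) ++ List.replicate (b.length - k) (0:Int) := by
  induction k with
  | zero =>
      simp [List.replicate_succ]
  | succ k ih =>
      have hk' : k ≤ b.length := Nat.le_of_succ_le hk
      rw [List.range_succ, List.foldl_append, ih hk']
      have hlenM : ((List.range (k + 1)).map (fun j => (b.take j).sum)).length = k + 1 := by simp
      have hgetk : (((List.range (k + 1)).map (fun j => (b.take j).sum)) ++ List.replicate (b.length - k) (0:Int)).getD k 0
          = (b.take k).sum := by
        rw [List.getD_append _ _ _ k (by omega)]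
        rw [List.getD_eq_getElem?_getD, List.getElem?_map,
          List.getElem?_range (by omega : k < k + 1)]
        rfl
      have hbk : b.getD k 0 = b[k]'(by omega) := by
        simp [List.getD_eq_getElem?_getD, List.getElem?_eq_getElem (by omega : k < b.length)]
      have hrep : List.replicate (b.length - k) (0:Int) = 0 :: List.replicate (b.length - (k+1)) (0:Int) := by
        have : b.length - k = (b.length - (k+1)) + 1 := by omega
        rw [this, List.replicate_succ]
      simp only [List.foldl_cons, List.foldl_nil, hgetk, hbk]
      rw [hrep, List.set_append]
      simp only [hlenM]
      rw [if_neg (by omega)]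
      have : (k + 1) - (k + 1) = 0 := by omega
      rw [this]
      simp only [List.set_cons_zero]
      rw [List.range_succ (n := k + 1), List.map_append]
      rw [List.append_assoc]
      congr 1
      simp only [List.map_cons, List.map_nil, List.cons_append, List.nil_append]
      have hts : (List.take (k + 1) b).sum = (List.take k b).sum + b[k]'(by omega) := by
        rw [List.sum_take_succ]
      rw [hts]

lemma pvLoopA_eq (b : List Int) (n : Nat) (hn : n = b.length) :
    pvLoopA b (List.replicate (n + 1) 0)
    = (List.range (n + 1)).map (fun j => (b.take j).sum) := by
  subst hn
  have h := pvLoop_inv b b.length le_rfl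
  simpa [pvLoopA] using h

-- ===== VERDICT (by name: the statement is the Claim_ definition above) =====
theorem calculate_batch_size_py_spec : Claim_equal_calculate_batch_size_py := by
  intro num iter_times _hdom hpre
  unfold Spec_calculate_batch_size_py calculate_batch_size_py calculate_batch_size_py_alt
  by_cases hle : num ≤ iter_times
  · rw [if_pos hle, if_pos hle]
    by_cases hn : 0 ≤ num
    · -- num ≥ 0 : prefix sums of [1]*num are 0..num
      have h1 : (num + 1).toNat = num.toNat + 1 := by omega
      rw [h1, pvLoopA_eq (List.replicate num.toNat (1:Int)) num.toNat (by simp)]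
      rw [PySem.List.pyRange_one]
      simp only [sub_zero, h1, zero_add]
      apply List.map_congr_left
      intro j hj
      have hj' : j ≤ num.toNat := by
        simp [List.mem_range] at hj; omega
      simp only [List.take_replicate, Nat.min_eq_left hj', List.sum_replicate, nsmul_eq_mul, mul_one]
    · -- num < 0 : both sides empty
      have h1 : num.toNat = 0 := by omega
      have h2 : (num + 1).toNat = 0 := by omega
      rw [PySem.List.pyRange_one_eq_nil (by omega)]
      simp [pvLoopA, h1, h2]
  · rw [if_neg hle, if_neg hle]
    simp only []
    set base := PySem.Int.floordiv num iter_times with hbase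
    set gt := num - iter_times * base with hgt
    have hmod : gt = PySem.Int.mod num iter_times := by
      have := PySem.Int.floordiv_mul_add_mod num iter_times
      rw [hgt, ← hbase] at *; linarith [this]
    by_cases hip : 0 < iter_times
    · -- positive iter_times
      have hmb : gt = num % iter_times := by rw [hmod, PySem.Int.mod_eq_emod_of_pos hip]
      have hg0 : 0 ≤ gt := by rw [hmb]; exact Int.emod_nonneg _ (by omega)
      have hglt : gt < iter_times := by rw [hmb]; exact Int.emod_lt_of_pos _ hip
      have hsum : gt.toNat + (iter_times - gt).toNat = iter_times.toNat := by omega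
      have hlen : (List.replicate gt.toNat (base + 1) ++ List.replicate (iter_times - gt).toNat base).length
          = iter_times.toNat := by simp [hsum]
      have hit1 : (iter_times + 1).toNat = iter_times.toNat + 1 := by omega
      rw [hit1, pvLoopA_eq _ iter_times.toNat hlen.symm]
      rw [PySem.List.pyRange_one]
      simp only [sub_zero, hit1, zero_add, List.map_map]
      apply List.map_congr_left
      intro j hj
      have hj' : j ≤ iter_times.toNat := by
        simp [List.mem_range] at hj; omega
      by_cases hjg : j ≤ gt.toNat
      · -- within the (base+1)-part
        rw [List.take_append]
        have : j - (List.replicate gt.toNat (base + 1)).length = 0 := by simp; omega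
        rw [this]
        simp only [List.take_replicate, Nat.min_eq_left (by simpa using hjg),
          Nat.zero_min, List.replicate_zero, List.append_nil, List.sum_replicate,
          Function.comp_apply, nsmul_eq_mul]
        have hmin : min (j : Int) gt = (j : Int) := by
          apply min_eq_left; omega
        rw [hmin]; ring
      · -- past the (base+1)-part
        rw [List.take_append]
        simp only [List.length_replicate]
        rw [List.take_replicate, Nat.min_eq_right (by omega), List.take_replicate,
          Nat.min_eq_left (by omega)]
        rw [List.sum_append]
        simp only [List.sum_replicate, nsmul_eq_mul, Function.comp_apply]
        have hmin : min (j : Int) gt = gt := by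
          apply min_eq_right; omega
        rw [hmin]
        have hgg : ((gt.toNat : Nat) : Int) = gt := by omega
        have hc : ((j - gt.toNat : Nat) : Int) = (j : Int) - ((gt.toNat : Nat) : Int) := by omega
        rw [hc, hgg]
        ring
    · -- negative iter_times (iter_times = 0 excluded by Pre_): everything empty
      have hit0 : iter_times ≠ 0 := by
        intro h; exact hpre ⟨h, by omega⟩
      have hneg : iter_times < 0 := by omega
      have hbounds : iter_times < gt ∧ gt ≤ 0 := by
        rw [hmod]
        have h1 : PySem.Int.mod num iter_times = - PySem.Int.mod (-num) (-iter_times) := by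
          have := PySem.Int.mod_neg_neg (-num) (-iter_times)
          simp only [neg_neg] at this
          exact this
        rw [h1, PySem.Int.mod_eq_emod_of_pos (by omega : (0:Int) < -iter_times)]
        have h2 := Int.emod_nonneg (-num) (by omega : -iter_times ≠ 0)
        have h3 := Int.emod_lt_of_pos (-num) (by omega : (0:Int) < -iter_times)
        omega
      have h1 : gt.toNat = 0 := by omega
      have h2 : (iter_times - gt).toNat = 0 := by omega
      have h3 : (iter_times + 1).toNat = 0 := by omega
      rw [PySem.List.pyRange_one_eq_nil (by omega)]
      simp [pvLoopA, h1, h2, h3]
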